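-- pv_equiv track=rewrite | github.com/tfl35/tacit-knowledge-lora | pipeline/scripts/rescore.py | _check_proximity
-- ===== SOURCE A (Python) =====
-- def _check_proximity(word_positions, window=60):
--     """Check if there exists a set of positions (one per word) all within window."""
--     words = list(word_positions.keys())
--     if len(words) == 2:
--         for p1 in word_positions[words[0]]:
--             for p2 in word_positions[words[1]]:
--                 if abs(p1 - p2) <= window:
--                     return True
--         return False
--     # For 3+ words, use greedy approach
--     for anchor in word_positions[words[0]]:
--         all_close = True
--         for w in words[1:]:
--             if not any(abs(anchor - p) <= window for p in word_positions[w]):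
--                 all_close = False
--                 break
--         if all_close:
--             return True
--     return False
-- ===== SOURCE B (Python) =====
-- def _check_proximity(word_positions, window=60):
--     """Check if some choice of positions (one per word) all lies within window.
--
--     Sorts every non-anchor word's positions once, then for each anchor position
--     of the first word binary-searches each sorted list for a position in
--     [anchor - window, anchor + window].
--     """
--     items = list(word_positions.items())
--     anchors = items[0][1]
--     rest = [sorted(ps) for _, ps in items[1:]]
--
--     def has_in_range(ps, lo, hi):
--         a, b = 0, len(ps)
--         while a < b:  # find leftmost index with ps[i] >= lo
--             m = (a + b) // 2
--             if ps[m] < lo: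
--                 a = m + 1
--             else:
--                 b = m
--         return a < len(ps) and ps[a] <= hi
--
--     for anchor in anchors:
--         if all(has_in_range(ps, anchor - window, anchor + window) for ps in rest):
--             return True
--     return False
-- ===== Notes on version B (the rewrite author's own statement) =====
-- stated objective: alternative
-- what changed: B drops A's 2-word special case and replaces every inner linear scan by one upfront sort of each non-anchor word's position list plus a hand-written binary search per anchor for a position in [anchor-window, anchor+window]; on random inputs A's early exit makes the two comparable in time.
import Mathlib
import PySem

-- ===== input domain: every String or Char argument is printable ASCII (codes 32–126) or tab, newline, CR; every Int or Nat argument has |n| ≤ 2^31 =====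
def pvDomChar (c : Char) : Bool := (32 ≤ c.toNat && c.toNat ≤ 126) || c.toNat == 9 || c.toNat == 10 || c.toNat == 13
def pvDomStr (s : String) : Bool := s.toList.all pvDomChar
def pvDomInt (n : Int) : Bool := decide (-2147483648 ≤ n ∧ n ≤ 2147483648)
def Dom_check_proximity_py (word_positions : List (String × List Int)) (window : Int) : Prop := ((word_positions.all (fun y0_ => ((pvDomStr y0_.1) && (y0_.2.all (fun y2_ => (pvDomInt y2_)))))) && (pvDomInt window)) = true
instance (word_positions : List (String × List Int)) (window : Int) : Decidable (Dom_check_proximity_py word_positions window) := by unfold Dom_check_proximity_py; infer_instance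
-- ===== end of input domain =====

-- B replaces A's per-anchor linear scans by one upfront sort of each non-anchor
-- position list plus a binary search per anchor, and drops A's 2-word special case.

-- ===== PORT A =====
def check_proximity_py (word_positions : List (String × List Int)) (window : Int) : Bool :=
  let d := PySem.Dict.mk word_positions
  let words := PySem.Dict.keys d
  if words.length = 2 then
    match PySem.List.pyGet? words 0, PySem.List.pyGet? words 1 with
    | some w0, some w1 =>
        -- word_positions[w] : w is always a key of d, so getD's default is never used
        (PySem.Dict.getD d w0 []).any (fun p1 =>
          (PySem.Dict.getD d w1 []).any (fun p2 => decide (|p1 - p2| ≤ window)))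
    | _, _ => false   -- unreachable: words.length = 2
  else
    match PySem.List.pyGet? words 0 with
    | none => false   -- Python raises IndexError here (empty dict); excluded by Pre_
    | some w0 =>
        (PySem.Dict.getD d w0 []).any (fun anchor =>
          (words.drop 1).all (fun w =>
            (PySem.Dict.getD d w []).any (fun p => decide (|anchor - p| ≤ window))))

-- ===== PORT B =====
-- the hand-written binary-search loop of Source B (leftmost index i in [a,b) with ps[i] ≥ t)
def pvLB (ps : List Int) (t : Int) (a b : Nat) : Nat :=
  if a < b then
    if ps.getD ((a + b) / 2) 0 < t then pvLB ps t ((a + b) / 2 + 1) b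
    else pvLB ps t a ((a + b) / 2)
  else a
termination_by b - a
decreasing_by all_goals omega

def pvHasInRange (ps : List Int) (lo hi : Int) : Bool :=
  let i := pvLB ps lo 0 ps.length
  decide (i < ps.length) && decide (ps.getD i 0 ≤ hi)

def check_proximity_py_alt (word_positions : List (String × List Int)) (window : Int) : Bool :=
  match word_positions with
  | [] => false   -- Source B raises IndexError here (items[0]); excluded by Pre_
  | (_, anchors) :: restItems =>
    let rest := restItems.map (fun e => PySem.List.sorted e.2 (fun x => x) false)
    anchors.any (fun anchor =>
      rest.all (fun ps => pvHasInRange ps (anchor - window) (anchor + window)))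

-- ===== PRECONDITION & SPEC =====
-- Pre_ excludes the empty dict, on which A raises IndexError, and association lists with
-- duplicate keys, which a Python dict cannot hold (the literal collapses duplicates before
-- A ever runs, so no behaviour of A on them exists to match).
def Pre_check_proximity_py (word_positions : List (String × List Int)) (window : Int) : Prop :=
  word_positions ≠ [] ∧ (word_positions.map Prod.fst).Nodup
instance (word_positions : List (String × List Int)) (window : Int) : Decidable (Pre_check_proximity_py word_positions window) := by unfold Pre_check_proximity_py; infer_instance

def pvWitness_check_proximity_py : (List (String × List Int)) × Int :=
  ([("alpha", [0, 200]), ("beta", [150])], 60)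

def Spec_check_proximity_py (word_positions : List (String × List Int)) (window : Int) (out : Bool) : Prop := out = check_proximity_py_alt word_positions window
instance (word_positions : List (String × List Int)) (window : Int) (out : Bool) : Decidable (Spec_check_proximity_py word_positions window out) := by unfold Spec_check_proximity_py; infer_instance

-- ===== CLAIM (what is proved, stated in full; the proofs are below) =====
def Claim_equal_check_proximity_py : Prop := ∀ (word_positions : List (String × List Int)) (window : Int), Dom_check_proximity_py word_positions window → Pre_check_proximity_py word_positions window → Spec_check_proximity_py word_positions window (check_proximity_py word_positions window)

-- ===== LEMMAS AND PROOFS =====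

theorem pvGetD_mono (ps : List Int) (hs : ps.Pairwise (· ≤ ·)) (p q : Nat)
    (hpq : p ≤ q) (hq : q < ps.length) : ps.getD p 0 ≤ ps.getD q 0 := by
  rcases eq_or_lt_of_le hpq with rfl | hlt
  · exact le_refl _
  · have hp : p < ps.length := lt_trans hlt hq
    rw [List.getD_eq_getElem ps 0 hp, List.getD_eq_getElem ps 0 hq]
    exact (List.pairwise_iff_getElem.mp hs) p q hp hq hlt

theorem pvLB_inv (ps : List Int) (t : Int) (hs : ps.Pairwise (· ≤ ·)) : ∀ (a b : Nat),
    b ≤ ps.length →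
    (∀ j < a, ps.getD j 0 < t) →
    (∀ j, b ≤ j → j < ps.length → t ≤ ps.getD j 0) →
    (∀ j < pvLB ps t a b, ps.getD j 0 < t) ∧
    (∀ j, pvLB ps t a b ≤ j → j < ps.length → t ≤ ps.getD j 0) := by
  intro a b
  induction a, b using pvLB.induct ps t with
  | case1 a b h hc ih =>
    intro hb hlow hhigh
    rw [pvLB, if_pos h, if_pos hc]
    exact ih hb
      (fun j hj => lt_of_le_of_lt (pvGetD_mono ps hs j ((a+b)/2) (by omega) (by omega)) hc)
      hhigh
  | case2 a b h hc ih =>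
    intro hb hlow hhigh
    rw [pvLB, if_pos h, if_neg hc]
    refine ih (by omega) hlow ?_
    intro j hj hjlen
    exact le_trans (not_lt.mp hc) (pvGetD_mono ps hs ((a+b)/2) j hj hjlen)
  | case3 a b h =>
    intro hb hlow hhigh
    rw [pvLB, if_neg h]
    exact ⟨hlow, fun j hj hjlen => hhigh j (by omega) hjlen⟩

theorem pvHasInRange_eq_any (ps : List Int) (lo hi : Int) (hs : ps.Pairwise (· ≤ ·)) :
    pvHasInRange ps lo hi = ps.any (fun p => decide (lo ≤ p ∧ p ≤ hi)) := by
  obtain ⟨h1, h2⟩ := pvLB_inv ps lo hs 0 ps.length (le_refl _)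
    (by omega) (by intro j hj hjlen; omega)
  rw [Bool.eq_iff_iff]
  simp only [pvHasInRange, List.any_eq_true, decide_eq_true_eq, Bool.and_eq_true]
  constructor
  · rintro ⟨hlt, hle⟩
    have hlt' : pvLB ps lo 0 ps.length < ps.length := hlt
    refine ⟨ps.getD (pvLB ps lo 0 ps.length) 0, ?_, h2 _ (le_refl _) hlt', hle⟩
    rw [List.getD_eq_getElem ps 0 hlt']
    exact List.getElem_mem _
  · rintro ⟨p, hp, hlo, hhi⟩
    obtain ⟨j, hj, rfl⟩ := List.getElem_of_mem hp
    have hjget : ps.getD j 0 = ps[j] := List.getD_eq_getElem ps 0 hj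
    rcases lt_or_ge j (pvLB ps lo 0 ps.length) with hji | hji
    · have := h1 j hji; rw [hjget] at this; omega
    · have hil : pvLB ps lo 0 ps.length < ps.length := lt_of_le_of_lt hji hj
      refine ⟨hil, ?_⟩
      calc ps.getD (pvLB ps lo 0 ps.length) 0 ≤ ps.getD j 0 := pvGetD_mono ps hs _ j hji hj
        _ ≤ hi := by rw [hjget]; exact hhi

theorem pvHasInRange_sorted (ps : List Int) (lo hi : Int) :
    pvHasInRange (PySem.List.sorted ps (fun x => x) false) lo hi
      = ps.any (fun p => decide (lo ≤ p ∧ p ≤ hi)) := by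
  rw [pvHasInRange_eq_any _ lo hi (by simpa using PySem.List.sorted_pairwise ps (fun x => x))]
  exact List.Perm.any_eq (PySem.List.sorted_perm ps (fun x => x) false)

theorem A_eq (w0 : String) (ps0 : List Int) (rest : List (String × List Int)) (window : Int)
    (hnd : (((w0, ps0) :: rest).map Prod.fst).Nodup) :
    check_proximity_py ((w0, ps0) :: rest) window
      = ps0.any (fun a => rest.all (fun e =>
          e.2.any (fun p => decide (a - window ≤ p ∧ p ≤ a + window)))) := by
  have habs : ∀ a p : Int, decide (|a - p| ≤ window) = decide (a - window ≤ p ∧ p ≤ a + window) :=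
    fun a p => decide_eq_decide.mpr (by rw [abs_le]; omega)
  have hget : ∀ e ∈ (w0, ps0) :: rest,
      PySem.Dict.getD (PySem.Dict.mk ((w0, ps0) :: rest)) e.1 [] = e.2 := by
    rintro ⟨k, v⟩ he
    exact PySem.Dict.getD_of_mem_items _ he (by simpa [PySem.Dict.keys] using hnd) []
  have hget0 : PySem.Dict.getD (PySem.Dict.mk ((w0, ps0) :: rest)) w0 [] = ps0 :=
    hget (w0, ps0) (List.mem_cons_self ..)
  unfold check_proximity_py
  simp only [PySem.Dict.keys_mk, List.map_cons, List.length_cons, List.length_map]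
  by_cases h2 : rest.length + 1 = 2
  · obtain ⟨e, rfl⟩ := List.length_eq_one_iff.mp (by omega : rest.length = 1)
    rw [if_pos (by simp)]
    simp only [List.map_cons, List.map_nil, PySem.List.pyGet?_zero_cons]
    rw [show PySem.List.pyGet? [w0, e.1] 1 = some e.1 by
      simp [PySem.List.pyGet?, PySem.List.pyIdx?]]
    dsimp only
    rw [hget0, hget e (by simp)]
    simp only [List.all_cons, List.all_nil, Bool.and_true, habs]
  · rw [if_neg (by simpa using h2)]
    simp only [PySem.List.pyGet?_zero_cons, List.drop_succ_cons, List.drop_zero]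
    rw [hget0]
    apply PySem.List.any_congr_mem
    intro a _
    simp only [List.all_eq_not_any_not, List.any_map]
    rw [PySem.List.any_congr_mem (g := fun e => !e.2.any (fun p => decide (a - window ≤ p ∧ p ≤ a + window)))]
    intro e he
    simp only [Function.comp, hget e (List.mem_cons_of_mem _ he), habs]

theorem B_eq (w0 : String) (ps0 : List Int) (rest : List (String × List Int)) (window : Int) :
    check_proximity_py_alt ((w0, ps0) :: rest) window
      = ps0.any (fun a => rest.all (fun e =>
          e.2.any (fun p => decide (a - window ≤ p ∧ p ≤ a + window)))) := by
  unfold check_proximity_py_alt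
  refine congrArg ps0.any (funext fun a => ?_)
  rw [List.all_map]
  refine congrArg rest.all (funext fun e => ?_)
  exact pvHasInRange_sorted e.2 (a - window) (a + window)

-- ===== VERDICT (by name: the statement is the Claim_ definition above) =====
theorem check_proximity_py_spec : Claim_equal_check_proximity_py := by
  intro wp window _ hpre
  obtain ⟨hne, hnodup⟩ := hpre
  unfold Spec_check_proximity_py
  cases wp with
  | nil => exact absurd rfl hne
  | cons hd rest =>
    obtain ⟨w0, ps0⟩ := hd
    rw [A_eq w0 ps0 rest window hnodup, B_eq]
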